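-- pv_equiv track=rewrite | github.com/casabot-official/addons | ai-automations/behaviour_detection.py | _auto_name
-- ===== SOURCE A (Python) =====
-- from typing      import List, Dict, Tuple, Optional
--
-- def _auto_name(areas: List[str], hour: int) -> str:
--     areas = sorted(areas)
--     if   5  <= hour < 9:  time_label = "Morning"
--     elif 9  <= hour < 12: time_label = "Late Morning"
--     elif 12 <= hour < 14: time_label = "Midday"
--     elif 14 <= hour < 17: time_label = "Afternoon"
--     elif 17 <= hour < 20: time_label = "Evening"
--     elif 20 <= hour < 23: time_label = "Night"
--     else:                 time_label = "Late Night"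
--     area_str = " + ".join(a.replace("_", " ").title() for a in areas)
--     return f"{time_label} — {area_str}"
-- ===== SOURCE B (Python) =====
-- def _bisect_right(bounds, x):
--     lo, hi = 0, len(bounds)
--     while lo < hi:
--         mid = (lo + hi) // 2
--         if x < bounds[mid]:
--             hi = mid
--         else:
--             lo = mid + 1
--     return lo
--
-- _BOUNDS = [5, 9, 12, 14, 17, 20, 23]
-- _LABELS = ["Late Night", "Morning", "Late Morning", "Midday",
--            "Afternoon", "Evening", "Night", "Late Night"]
--
-- def _auto_name(areas, hour):
--     time_label = _LABELS[_bisect_right(_BOUNDS, hour)]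
--     area_str = " + ".join(a.replace("_", " ").title() for a in sorted(areas))
--     return f"{time_label} — {area_str}"
-- ===== Notes on version B (the rewrite author's own statement) =====
-- stated objective: idiomatic
-- what changed: Replaces the sequential if-elif range chain with a table of hour boundaries and labels resolved by a hand-written bisect_right binary search; the sorted-areas formatting line is unchanged.
import Mathlib
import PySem

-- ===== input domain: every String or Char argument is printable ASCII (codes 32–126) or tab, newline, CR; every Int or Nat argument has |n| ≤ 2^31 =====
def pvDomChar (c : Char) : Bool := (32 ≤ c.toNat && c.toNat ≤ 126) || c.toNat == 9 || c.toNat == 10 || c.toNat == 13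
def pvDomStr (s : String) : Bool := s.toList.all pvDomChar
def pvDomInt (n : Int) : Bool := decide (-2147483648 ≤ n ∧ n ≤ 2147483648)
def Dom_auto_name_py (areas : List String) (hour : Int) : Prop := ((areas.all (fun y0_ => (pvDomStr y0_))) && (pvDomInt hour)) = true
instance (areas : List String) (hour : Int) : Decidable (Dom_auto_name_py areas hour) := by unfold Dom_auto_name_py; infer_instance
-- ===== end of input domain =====

-- B replaces A's sequential if-elif range chain by a hand-written binary search over a
-- boundary table (idiomatic table-driven lookup); the area formatting is unchanged.

-- str.title(), ported by hand (exact on the ASCII domain: a letter after a non-letter is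
-- uppercased, a letter after a letter is lowercased, non-letters pass through).
def pyTitle (s : String) : String :=
  String.ofList ((s.toList.foldl
    (fun (st : List Char × Bool) c =>
      if PySem.Chars.isalpha c then
        ((if st.2 then PySem.Chars.lowerChar c else PySem.Chars.upperChar c) :: st.1, true)
      else (c :: st.1, false))
    ([], false)).1.reverse)

-- " + ".join(a.replace("_", " ").title() for a in sorted(areas)) — identical line in A and B.
def areaStr (areas : List String) : String :=
  PySem.Str.join " + " ((PySem.List.sorted areas (fun x => x) false).map
    (fun a => pyTitle (PySem.Str.replace a "_" " ")))

-- ===== PORT A =====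
def auto_name_py (areas : List String) (hour : Int) : String :=
  let time_label :=
    if 5 ≤ hour ∧ hour < 9 then "Morning"
    else if 9 ≤ hour ∧ hour < 12 then "Late Morning"
    else if 12 ≤ hour ∧ hour < 14 then "Midday"
    else if 14 ≤ hour ∧ hour < 17 then "Afternoon"
    else if 17 ≤ hour ∧ hour < 20 then "Evening"
    else if 20 ≤ hour ∧ hour < 23 then "Night"
    else "Late Night"
  time_label ++ " — " ++ areaStr areas

-- ===== PORT B =====
-- Source B's hand-written bisect_right while-loop; fuel (= len(bounds)) only bounds the
-- iteration count (the interval halves each pass), it never changes the computed value.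
def bisrGo (bounds : List Int) (x : Int) : Nat → Nat → Nat → Nat
  | 0, lo, _ => lo
  | fuel + 1, lo, hi =>
    if lo < hi then
      let mid := (lo + hi) / 2
      if x < bounds.getD mid 0 then bisrGo bounds x fuel lo mid
      else bisrGo bounds x fuel (mid + 1) hi
    else lo

def bisr (bounds : List Int) (x : Int) : Nat :=
  bisrGo bounds x bounds.length 0 bounds.length

def pvBounds : List Int := [5, 9, 12, 14, 17, 20, 23]
def pvLabels : List String :=
  ["Late Night", "Morning", "Late Morning", "Midday", "Afternoon", "Evening", "Night", "Late Night"]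

def auto_name_py_alt (areas : List String) (hour : Int) : String :=
  let time_label := (PySem.List.pyGet? pvLabels (bisr pvBounds hour : Int)).getD ""
  time_label ++ " — " ++ areaStr areas

-- ===== PRECONDITION & SPEC =====
def Spec_auto_name_py (areas : List String) (hour : Int) (out : String) : Prop := out = auto_name_py_alt areas hour
instance (areas : List String) (hour : Int) (out : String) : Decidable (Spec_auto_name_py areas hour out) := by unfold Spec_auto_name_py; infer_instance

-- ===== CLAIM (what is proved, stated in full; the proofs are below) =====
def Claim_equal_auto_name_py : Prop := ∀ (areas : List String) (hour : Int), Dom_auto_name_py areas hour → Spec_auto_name_py areas hour (auto_name_py areas hour)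

-- ===== LEMMAS AND PROOFS =====
lemma go_zero (bs : List Int) (x : Int) (lo hi : Nat) : bisrGo bs x 0 lo hi = lo := rfl

lemma go_succ (bs : List Int) (x : Int) (f lo hi : Nat) :
    bisrGo bs x (f + 1) lo hi =
      if lo < hi then
        (if x < bs.getD ((lo + hi) / 2) 0 then bisrGo bs x f lo ((lo + hi) / 2)
         else bisrGo bs x f ((lo + hi) / 2 + 1) hi)
      else lo := rfl

lemma go_base (bs : List Int) (x : Int) (f lo : Nat) : bisrGo bs x f lo lo = lo := by
  cases f <;> simp [go_zero, go_succ]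

lemma L01 (x : Int) (f : Nat) :
    bisrGo [5, 9, 12, 14, 17, 20, 23] x (f + 1) 0 1 = if x < 5 then 0 else 1 := by
  rw [go_succ]; norm_num [go_base]

lemma L23 (x : Int) (f : Nat) :
    bisrGo [5, 9, 12, 14, 17, 20, 23] x (f + 1) 2 3 = if x < 12 then 2 else 3 := by
  rw [go_succ]; norm_num [go_base]

lemma L45 (x : Int) (f : Nat) :
    bisrGo [5, 9, 12, 14, 17, 20, 23] x (f + 1) 4 5 = if x < 17 then 4 else 5 := by
  rw [go_succ]; norm_num [go_base]

lemma L67 (x : Int) (f : Nat) :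
    bisrGo [5, 9, 12, 14, 17, 20, 23] x (f + 1) 6 7 = if x < 23 then 6 else 7 := by
  rw [go_succ]; norm_num [go_base]

lemma L03 (x : Int) (f : Nat) :
    bisrGo [5, 9, 12, 14, 17, 20, 23] x (f + 2) 0 3 =
      if x < 9 then (if x < 5 then 0 else 1) else (if x < 12 then 2 else 3) := by
  rw [show f + 2 = (f + 1) + 1 by ring, go_succ]; norm_num [L01, L23]

lemma L47 (x : Int) (f : Nat) :
    bisrGo [5, 9, 12, 14, 17, 20, 23] x (f + 2) 4 7 =
      if x < 20 then (if x < 17 then 4 else 5) else (if x < 23 then 6 else 7) := by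
  rw [show f + 2 = (f + 1) + 1 by ring, go_succ]; norm_num [L45, L67]

lemma bisr_val (x : Int) :
    bisr [5, 9, 12, 14, 17, 20, 23] x =
      if x < 5 then 0 else if x < 9 then 1 else if x < 12 then 2
      else if x < 14 then 3 else if x < 17 then 4 else if x < 20 then 5
      else if x < 23 then 6 else 7 := by
  show bisrGo [5, 9, 12, 14, 17, 20, 23] x (6 + 1) 0 7 = _
  rw [go_succ]
  norm_num [L03, L47]
  split_ifs <;> omega

lemma label_eq (hour : Int) :
    (if 5 ≤ hour ∧ hour < 9 then "Morning"
     else if 9 ≤ hour ∧ hour < 12 then "Late Morning"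
     else if 12 ≤ hour ∧ hour < 14 then "Midday"
     else if 14 ≤ hour ∧ hour < 17 then "Afternoon"
     else if 17 ≤ hour ∧ hour < 20 then "Evening"
     else if 20 ≤ hour ∧ hour < 23 then "Night"
     else "Late Night") =
    (PySem.List.pyGet? pvLabels (bisr pvBounds hour : Int)).getD "" := by
  have h : pvBounds = [5, 9, 12, 14, 17, 20, 23] := rfl
  rw [h, bisr_val]
  split_ifs <;> first | rfl | omega

-- ===== VERDICT (by name: the statement is the Claim_ definition above) =====
theorem auto_name_py_spec : Claim_equal_auto_name_py := by
  intro areas hour _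
  unfold Spec_auto_name_py auto_name_py auto_name_py_alt
  rw [label_eq]
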